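-- pv_equiv track=rewrite | github.com/jayanth920/dsa | Dynamic Programming/#1937 Maximum Number of Points with Cost/main.py | solve
-- ===== SOURCE A (Python) =====
-- def solve(points):
--         m, n = len(points), len(points[0])
--         dp = points[0]
--
--         for r in range(1, m):
--             # Left-to-Right pass
--             left = [0] * n
--             left[0] = dp[0]
--             for c in range(1, n):
--                 left[c] = max(left[c - 1] - 1, dp[c])
--
--             # Right-to-Left pass
--             right = [0] * n
--             right[-1] = dp[-1]
--             for c in range(n - 2, -1, -1):
--                 right[c] = max(right[c + 1] - 1, dp[c])
--
--             # Update dp for the current row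
--             for c in range(n):
--                 dp[c] = points[r][c] + max(left[c], right[c])
--
--         return max(dp)
-- ===== SOURCE B (Python) =====
-- def solve(points):
--     dp = points[0]
--     for row in points[1:]:
--         dp[:] = [row[c] + max(dp[j] - abs(j - c) for j in range(len(dp)))
--                  for c in range(len(dp))]
--     return max(dp)
-- ===== Notes on version B (the rewrite author's own statement) =====
-- stated objective: simpler
-- what changed: Replaces A's two decay-by-one directional sweeps (left/right arrays plus an update pass) by the direct definition of the recurrence: each new cell takes the brute-force maximum of dp[j] - |j - c| over all columns j, so the three staged passes per row collapse to one comprehension.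
-- outside the precondition, e.g. on solve([]): A raises IndexError, B raises IndexError
import Mathlib
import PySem

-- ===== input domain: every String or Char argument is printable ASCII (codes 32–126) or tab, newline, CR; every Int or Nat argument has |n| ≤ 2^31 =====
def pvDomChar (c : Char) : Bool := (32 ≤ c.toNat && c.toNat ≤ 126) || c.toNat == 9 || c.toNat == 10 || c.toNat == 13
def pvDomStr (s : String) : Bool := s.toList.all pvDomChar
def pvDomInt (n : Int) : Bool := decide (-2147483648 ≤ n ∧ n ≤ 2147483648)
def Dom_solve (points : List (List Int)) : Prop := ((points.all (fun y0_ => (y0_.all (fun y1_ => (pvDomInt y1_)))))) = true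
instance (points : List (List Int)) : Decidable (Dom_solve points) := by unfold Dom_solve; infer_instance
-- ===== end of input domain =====

-- B replaces A's three staged passes per row (left decay sweep, right decay sweep, update) by the direct
-- definition: each new cell is row[c] + max over all j of dp[j] - |j - c| (simpler, not faster); both A and B
-- mutate points[0] in place in Python — the equivalence proved here is about the return value.

-- ===== PORT A =====
-- left/right/update loops of one row iteration of A, transliterated
def solveLeftA (dp : List Int) (n : Nat) : List Int :=
  (PySem.List.pyRange 1 (n : Int) 1).foldl
    (fun left c => left.set c.toNat (max (PySem.List.pyGetD left (c - 1) 0 - 1) (PySem.List.pyGetD dp c 0)))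
    ((List.replicate n (0 : Int)).set 0 (PySem.List.pyGetD dp 0 0))

def solveRightA (dp : List Int) (n : Nat) : List Int :=
  (PySem.List.pyRange ((n : Int) - 2) (-1) (-1)).foldl
    (fun right c => right.set c.toNat (max (PySem.List.pyGetD right (c + 1) 0 - 1) (PySem.List.pyGetD dp c 0)))
    ((List.replicate n (0 : Int)).set (n - 1) (PySem.List.pyGetD dp (-1) 0))

def solveRowA (n : Nat) (dp row : List Int) : List Int :=
  let left := solveLeftA dp n
  let right := solveRightA dp n
  (PySem.List.pyRange 0 (n : Int) 1).foldl
    (fun dp' c => dp'.set c.toNat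
      (PySem.List.pyGetD row c 0 + max (PySem.List.pyGetD left c 0) (PySem.List.pyGetD right c 0)))
    dp

def solve (points : List (List Int)) : Int :=
  let m := points.length
  let n := (PySem.List.pyGetD points 0 []).length
  let dp := (PySem.List.pyRange 1 (m : Int) 1).foldl
    (fun dp r => solveRowA n dp (PySem.List.pyGetD points r [])) (PySem.List.pyGetD points 0 [])
  (PySem.List.max? dp (fun y => y)).getD 0

-- ===== PORT B =====
-- one row of B: the comprehension [row[c] + max(dp[j] - abs(j - c) for j in range(len(dp))) for c in range(len(dp))]
def solveRowB (dp row : List Int) : List Int :=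
  (PySem.List.pyRange 0 (dp.length : Int) 1).map (fun c =>
    PySem.List.pyGetD row c 0 +
      ((PySem.List.max? ((PySem.List.pyRange 0 (dp.length : Int) 1).map
          (fun j => PySem.List.pyGetD dp j 0 - |j - c|)) (fun y => y)).getD 0))

def solve_alt (points : List (List Int)) : Int :=
  let dp := (PySem.List.slice points (some 1) none).foldl solveRowB (PySem.List.pyGetD points 0 [])
  (PySem.List.max? dp (fun y => y)).getD 0

-- ===== PRECONDITION & SPEC =====
-- Pre_ excludes exactly the inputs where Python A raises: an empty list (IndexError on points[0]),
-- an empty first row (ValueError from max([]) or IndexError on left[0]), and a later row shorter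
-- than the first (IndexError on points[r][c]).
def Pre_solve (points : List (List Int)) : Prop :=
  points ≠ [] ∧ points.headD [] ≠ [] ∧ ∀ row ∈ points, (points.headD []).length ≤ row.length
instance (points : List (List Int)) : Decidable (Pre_solve points) := by unfold Pre_solve; infer_instance
def pvWitness_solve : List (List Int) := [[1, 2, 3], [4, 5, 6]]

def Spec_solve (points : List (List Int)) (out : Int) : Prop := out = solve_alt points
instance (points : List (List Int)) (out : Int) : Decidable (Spec_solve points out) := by unfold Spec_solve; infer_instance

-- ===== CLAIM (what is proved, stated in full; the proofs are below) =====
def Claim_equal_solve : Prop := ∀ (points : List (List Int)), Dom_solve points → Pre_solve points → Spec_solve points (solve points)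

-- ===== LEMMAS AND PROOFS =====

-- recurrences of A's two decay passes
def Lv (dp : List Int) : Nat → Int
  | 0 => dp.getD 0 0
  | c + 1 => max (Lv dp c - 1) (dp.getD (c + 1) 0)

def Rv (dp : List Int) (n : Nat) : Nat → Int
  | 0 => dp.getD (n - 1) 0
  | k + 1 => max (Rv dp n k - 1) (dp.getD (n - 1 - (k + 1)) 0)

-- running maximum of f 0, …, f k (the shape of B's brute-force inner max)
def bmax (f : Nat → Int) : Nat → Int
  | 0 => f 0
  | k + 1 => max (bmax f k) (f (k + 1))

lemma bmax_congr (f g : Nat → Int) (k : Nat) (h : ∀ j ≤ k, f j = g j) :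
    bmax f k = bmax g k := by
  induction k with
  | zero => simpa [bmax] using h 0 le_rfl
  | succ k ih =>
    simp only [bmax]
    rw [ih (fun j hj => h j (by omega)), h (k + 1) le_rfl]

lemma bmax_sub_const (f : Nat → Int) (a : Int) (k : Nat) :
    bmax (fun j => f j - a) k = bmax f k - a := by
  induction k with
  | zero => simp [bmax]
  | succ k ih => simp only [bmax, ih, max_sub_sub_right]

lemma le_bmax (f : Nat → Int) (k j : Nat) (h : j ≤ k) : f j ≤ bmax f k := by
  induction k with
  | zero => simp_all [bmax]
  | succ k ih =>
    simp only [bmax]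
    rcases Nat.eq_or_lt_of_le h with h1 | h1
    · exact h1 ▸ le_max_right _ _
    · exact le_trans (ih (by omega)) (le_max_left _ _)

lemma bmax_le (f : Nat → Int) (k : Nat) (a : Int) (h : ∀ j ≤ k, f j ≤ a) :
    bmax f k ≤ a := by
  induction k with
  | zero => exact h 0 le_rfl
  | succ k ih =>
    simp only [bmax, max_le_iff]
    exact ⟨ih (fun j hj => h j (by omega)), h (k + 1) le_rfl⟩

lemma Lv_eq_bmax (dp : List Int) (c : Nat) :
    Lv dp c = bmax (fun j => dp.getD j 0 - ((c : Int) - (j : Int))) c := by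
  induction c with
  | zero => simp [Lv, bmax]
  | succ c ih =>
    simp only [Lv, bmax]
    rw [ih]
    congr 1
    · rw [← bmax_sub_const (fun j => dp.getD j 0 - ((c : Int) - (j : Int))) 1 c]
      exact (bmax_congr _ _ c (fun j hj => by push_cast; ring)).symm
    · push_cast; ring_nf
lemma Rv_eq_bmax (dp : List Int) (n : Nat) (k : Nat) :
    Rv dp n k = bmax (fun i => dp.getD (n - 1 - i) 0 - ((k : Int) - (i : Int))) k := by
  induction k with
  | zero => simp [Rv, bmax]
  | succ k ih =>
    simp only [Rv, bmax]
    rw [ih]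
    congr 1
    · rw [← bmax_sub_const (fun i => dp.getD (n - 1 - i) 0 - ((k : Int) - (i : Int))) 1 k]
      exact (bmax_congr _ _ k (fun j hj => by push_cast; ring)).symm
    · push_cast; ring_nf

-- |j - i| split by side of i
lemma abs_sub_left (j i : Nat) (h : j ≤ i) : |(j : Int) - (i : Int)| = (i : Int) - (j : Int) := by
  rw [abs_sub_comm, abs_of_nonneg (by omega : (0 : Int) ≤ (i : Int) - (j : Int))]

lemma abs_sub_right (j i : Nat) (h : i ≤ j) : |(j : Int) - (i : Int)| = (j : Int) - (i : Int) := by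
  rw [abs_of_nonneg (by omega : (0 : Int) ≤ (j : Int) - (i : Int))]

-- the two directional maxima of A combine to B's brute-force distance maximum
lemma max_Lv_Rv_eq_bmax (dp : List Int) (n : Nat) (i : Nat) (hi : i < n) :
    max (Lv dp i) (Rv dp n (n - 1 - i)) =
      bmax (fun j => dp.getD j 0 - |(j : Int) - (i : Int)|) (n - 1) := by
  apply le_antisymm
  · apply max_le
    · rw [Lv_eq_bmax]
      apply bmax_le
      intro j hj
      have := le_bmax (fun j => dp.getD j 0 - |(j : Int) - (i : Int)|) (n - 1) j (by omega)
      simpa [abs_sub_left j i hj] using this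
    · rw [Rv_eq_bmax]
      apply bmax_le
      intro t ht
      have := le_bmax (fun j => dp.getD j 0 - |(j : Int) - (i : Int)|) (n - 1) (n - 1 - t)
        (by omega)
      have habs : |((n - 1 - t : Nat) : Int) - (i : Int)| = ((n - 1 - i : Nat) : Int) - (t : Int) := by
        rw [abs_sub_right (n - 1 - t) i (by omega)]
        omega
      simpa [habs] using this
  · apply bmax_le
    intro j hj
    by_cases hji : j ≤ i
    · refine le_trans ?_ (le_max_left _ _)
      rw [Lv_eq_bmax]
      have := le_bmax (fun j => dp.getD j 0 - ((i : Int) - (j : Int))) i j hji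
      simpa [abs_sub_left j i hji] using this
    · refine le_trans ?_ (le_max_right _ _)
      rw [Rv_eq_bmax]
      have := le_bmax
        (fun t => dp.getD (n - 1 - t) 0 - (((n - 1 - i : Nat) : Int) - (t : Int)))
        (n - 1 - i) (n - 1 - j) (by omega)
      have hidx : n - 1 - (n - 1 - j) = j := by omega
      have habs : |(j : Int) - (i : Int)| = ((n - 1 - i : Nat) : Int) - ((n - 1 - j : Nat) : Int) := by
        rw [abs_sub_right j i (by omega)]
        omega
      dsimp only at this
      rw [hidx] at this
      simpa [habs] using this

-- B's inner max(generator) as a running maximum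
lemma foldl_max_pyRange (g : Int → Int) (k : Nat) :
    ((PySem.List.pyRange 1 ((k : Int) + 1) 1).map g).foldl max (g 0) =
      bmax (fun j => g (j : Int)) k := by
  induction k with
  | zero =>
    rw [show ((0 : Nat) : Int) + 1 = 1 from rfl, PySem.List.pyRange_one_eq_nil le_rfl]
    simp [bmax]
  | succ k ih =>
    rw [show ((k + 1 : Nat) : Int) + 1 = (((k : Int) + 1)) + 1 from (by push_cast; ring),
      PySem.List.pyRange_one_succ_right (by omega), List.map_append, List.foldl_append, ih]
    simp [bmax]

-- A-side pass characterisations (kept from the A port analysis)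
lemma ofFn_set_eq {n : Nat} (f : Fin n → Int) (k : Nat) (v : Int) :
    (List.ofFn f).set k v = List.ofFn (fun i : Fin n => if i.1 = k then v else f i) := by
  apply List.ext_getElem
  · simp
  · intro i h1 h2
    simp only [List.getElem_set, List.getElem_ofFn]
    split_ifs <;> first | rfl | omega

lemma pyGetD_ofFn {n : Nat} (f : Fin n → Int) (k : Nat) (hk : k < n) (d : Int) :
    PySem.List.pyGetD (List.ofFn f) (k : Int) d = f ⟨k, hk⟩ := by
  rw [PySem.List.pyGetD_natCast]
  have h : k < (List.ofFn f).length := by rw [List.length_ofFn]; exact hk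
  rw [List.getD_eq_getElem _ _ h, List.getElem_ofFn]

lemma pyRange_neg_one_append_last (a t : Int) (h : t ≤ a) :
    PySem.List.pyRange a (t - 1) (-1) = PySem.List.pyRange a t (-1) ++ [t] := by
  rw [PySem.List.pyRange_neg_one_eq_reverse, PySem.List.pyRange_neg_one_eq_reverse]
  have h1 : (t - 1) + 1 = t := by ring
  rw [h1, PySem.List.pyRange_one_cons (by omega)]
  simp

lemma left_build_aux (dp : List Int) (n : Nat) (k : Nat) (h1 : 1 ≤ k) (h2 : k ≤ n) :
    (PySem.List.pyRange 1 (k : Int) 1).foldl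
      (fun left c => left.set c.toNat (max (PySem.List.pyGetD left (c - 1) 0 - 1) (PySem.List.pyGetD dp c 0)))
      ((List.replicate n (0 : Int)).set 0 (PySem.List.pyGetD dp 0 0))
    = List.ofFn (fun i : Fin n => if i.1 < k then Lv dp i.1 else 0) := by
  revert h2
  induction k, h1 using Nat.le_induction with
  | base =>
    intro h2
    rw [show ((1 : Nat) : Int) = 1 from rfl, PySem.List.pyRange_one_eq_nil le_rfl, List.foldl_nil]
    apply List.ext_getElem
    · simp
    · intro i hi1 hi2
      simp only [List.getElem_set, List.getElem_replicate, List.getElem_ofFn]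
      rcases Nat.eq_zero_or_pos i with h | h
      · subst h
        rw [if_pos rfl, if_pos (by omega)]
        simp [Lv, PySem.List.pyGetD_zero]
      · rw [if_neg (by omega), if_neg (by omega)]
  | succ k hk1 ih =>
    intro h2
    obtain ⟨k', rfl⟩ : ∃ k', k = k' + 1 := ⟨k - 1, by omega⟩
    have hcast : ((k' + 1 + 1 : Nat) : Int) = ((k' + 1 : Nat) : Int) + 1 := by push_cast; ring
    rw [hcast, PySem.List.pyRange_one_succ_right (by exact_mod_cast hk1), List.foldl_append,
      ih (by omega), List.foldl_cons, List.foldl_nil]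
    have e1 : ((k' + 1 : Nat) : Int) - 1 = ((k' : Nat) : Int) := by push_cast; ring
    rw [e1, pyGetD_ofFn _ k' (by omega)]
    beta_reduce
    rw [Fin.val_mk, if_pos (by omega),
      show (((k' + 1 : Nat) : Int)).toNat = k' + 1 from (by omega),
      PySem.List.pyGetD_natCast, ofFn_set_eq]
    congr 1
    funext i
    rcases eq_or_ne i.1 (k' + 1) with h | h
    · rw [if_pos h, if_pos (by omega), h]
      simp [Lv]
    · rw [if_neg h]
      by_cases h2' : i.1 < k' + 1
      · rw [if_pos h2', if_pos (by omega)]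
      · rw [if_neg h2', if_neg (by omega)]

lemma left_build (dp : List Int) (n : Nat) (hn : 1 ≤ n) :
    solveLeftA dp n = List.ofFn (fun i : Fin n => Lv dp i.1) := by
  unfold solveLeftA
  rw [left_build_aux dp n n hn le_rfl]
  congr 1
  funext i
  rw [if_pos i.2]

lemma right_build_aux (dp : List Int) (n : Nat) (hn : 1 ≤ n) (hdp : dp.length = n)
    (k : Nat) (hk : k ≤ n - 1) :
    (PySem.List.pyRange ((n : Int) - 2) ((n : Int) - 2 - (k : Int)) (-1)).foldl
      (fun right c => right.set c.toNat (max (PySem.List.pyGetD right (c + 1) 0 - 1) (PySem.List.pyGetD dp c 0)))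
      ((List.replicate n (0 : Int)).set (n - 1) (dp.getD (n - 1) 0))
    = List.ofFn (fun i : Fin n => if n - 1 - k ≤ i.1 then Rv dp n (n - 1 - i.1) else 0) := by
  induction k with
  | zero =>
    rw [show ((n : Int) - 2 - ((0 : Nat) : Int)) = (n : Int) - 2 from (by push_cast; ring),
      PySem.List.pyRange_neg_one_eq_nil le_rfl, List.foldl_nil]
    apply List.ext_getElem
    · simp
    · intro i hi1 hi2
      simp only [List.getElem_set, List.getElem_replicate, List.getElem_ofFn]
      have hin : i < n := by simpa using hi2
      rcases eq_or_ne i (n - 1) with h | h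
      · rw [if_pos h.symm, if_pos (by omega), h, show n - 1 - (n - 1) = 0 from (by omega)]
        rfl
      · rw [if_neg (by omega), if_neg (by omega)]
  | succ k ih =>
    have e : ((n : Int) - 2 - ((k + 1 : Nat) : Int)) = ((n : Int) - 2 - (k : Int)) - 1 := by
      push_cast; ring
    rw [e, pyRange_neg_one_append_last _ _ (by omega), List.foldl_append, ih (by omega),
      List.foldl_cons, List.foldl_nil]
    have e1 : ((n : Int) - 2 - (k : Int)) + 1 = ((n - 1 - k : Nat) : Int) := by omega
    rw [e1, pyGetD_ofFn _ (n - 1 - k) (by omega)]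
    beta_reduce
    rw [Fin.val_mk, if_pos le_rfl, show n - 1 - (n - 1 - k) = k from (by omega),
      show ((n : Int) - 2 - (k : Int)) = ((n - 2 - k : Nat) : Int) from (by omega),
      PySem.List.pyGetD_natCast,
      show (((n - 2 - k : Nat) : Int)).toNat = n - 2 - k from (by omega), ofFn_set_eq]
    congr 1
    funext i
    rcases eq_or_ne i.1 (n - 2 - k) with h | h
    · rw [if_pos h, if_pos (by omega), h, show n - 1 - (n - 2 - k) = k + 1 from (by omega)]
      simp only [Rv]
      rw [show n - 1 - (k + 1) = n - 2 - k from (by omega)]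
    · rw [if_neg h]
      by_cases h2 : n - 1 - k ≤ i.1
      · rw [if_pos h2, if_pos (by omega)]
      · rw [if_neg h2, if_neg (by omega)]

lemma right_build (dp : List Int) (n : Nat) (hn : 1 ≤ n) (hdp : dp.length = n) :
    solveRightA dp n = List.ofFn (fun i : Fin n => Rv dp n (n - 1 - i.1)) := by
  unfold solveRightA
  have hinit : PySem.List.pyGetD dp (-1) 0 = dp.getD (n - 1) 0 := by
    rw [PySem.List.pyGetD_neg_ofNat dp 1 0 (by omega) (by omega),
      List.getD_eq_getElem dp 0 (by omega)]
    congr 1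
    omega
  rw [hinit]
  have := right_build_aux dp n hn hdp (n - 1) le_rfl
  rw [show ((n : Int) - 2 - ((n - 1 : Nat) : Int)) = -1 from (by omega)] at this
  rw [this]
  congr 1
  funext i
  rw [if_pos (by omega)]

lemma overwrite_aux (dp : List Int) (n : Nat) (hdp : dp.length = n) (g : Int → Int)
    (k : Nat) (hk : k ≤ n) :
    (PySem.List.pyRange 0 (k : Int) 1).foldl (fun acc c => acc.set c.toNat (g c)) dp
    = List.ofFn (fun i : Fin n => if i.1 < k then g i.1 else dp.getD i.1 0) := by
  induction k with
  | zero =>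
    rw [PySem.List.pyRange_one_eq_nil (by simp)]
    apply List.ext_getElem
    · simp [hdp]
    · intro i h1 h2
      simp only [List.foldl_nil, List.getElem_ofFn]
      rw [if_neg (by omega), List.getD_eq_getElem dp 0 (by simpa using h1)]
      rfl
  | succ k ih =>
    have hk' : k ≤ n := by omega
    have hcast : ((k + 1 : Nat) : Int) = (k : Int) + 1 := by push_cast; ring
    rw [hcast, PySem.List.pyRange_one_succ_right (by positivity), List.foldl_append,
      ih hk', List.foldl_cons, List.foldl_nil]
    have htn : ((k : Int)).toNat = k := by omega
    rw [htn, ofFn_set_eq]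
    congr 1
    funext i
    rcases eq_or_ne i.1 k with h | h
    · simp [h]
    · rw [if_neg h]
      by_cases h2 : i.1 < k
      · rw [if_pos h2, if_pos (by omega)]
      · rw [if_neg h2, if_neg (by omega)]

lemma overwrite_fold (dp : List Int) (n : Nat) (hdp : dp.length = n) (g : Int → Int) :
    (PySem.List.pyRange 0 (n : Int) 1).foldl (fun acc c => acc.set c.toNat (g c)) dp
    = List.ofFn (fun i : Fin n => g i.1) := by
  rw [overwrite_aux dp n hdp g n le_rfl]
  congr 1
  funext i
  rw [if_pos i.2]

lemma row_eq (n : Nat) (hn : 1 ≤ n) (dp row : List Int) (hdp : dp.length = n) :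
    solveRowA n dp row = solveRowB dp row := by
  unfold solveRowA solveRowB
  dsimp only
  rw [hdp, overwrite_fold dp n hdp, left_build dp n hn, right_build dp n hn hdp]
  apply List.ext_getElem
  · rw [List.length_ofFn, List.length_map, PySem.List.length_pyRange_one]
    omega
  · intro t h1 h2
    have ht : t < n := by simpa using h1
    rw [List.getElem_ofFn, List.getElem_map, PySem.List.getElem_pyRange_one, zero_add]
    rw [pyGetD_ofFn _ t ht, pyGetD_ofFn _ t ht]
    congr 1
    rw [max_Lv_Rv_eq_bmax dp n t ht]
    rw [PySem.List.pyRange_one_cons (by omega : (0 : Int) < (n : Int)), List.map_cons,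
      PySem.List.max?_id_cons, Option.getD_some,
      show (0 : Int) + 1 = 1 from rfl,
      show ((n : Nat) : Int) = ((n - 1 : Nat) : Int) + 1 from (by omega),
      foldl_max_pyRange (fun j => PySem.List.pyGetD dp j 0 - |j - (t : Int)|) (n - 1)]
    apply bmax_congr
    intro j hj
    rw [PySem.List.pyGetD_natCast]

lemma rowB_length (dp row : List Int) : (solveRowB dp row).length = dp.length := by
  unfold solveRowB
  rw [List.length_map, PySem.List.length_pyRange_one]
  omega

lemma rows_eq (n : Nat) (hn : 1 ≤ n) (rows : List (List Int)) :
    ∀ dp : List Int, dp.length = n →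
      rows.foldl (solveRowA n) dp = rows.foldl solveRowB dp := by
  induction rows with
  | nil => intro dp _; rfl
  | cons row rest ih =>
    intro dp hdp
    simp only [List.foldl_cons]
    rw [row_eq n hn dp row hdp]
    exact ih _ (by rw [rowB_length, hdp])

-- ===== VERDICT (by name: the statement is the Claim_ definition above) =====
theorem solve_spec : Claim_equal_solve := by
  unfold Claim_equal_solve
  intro points hdom hpre
  unfold Spec_solve
  obtain ⟨hne, hhead, hrows⟩ := hpre
  cases points with
  | nil => exact absurd rfl hne
  | cons p rest =>
    have hn : 1 ≤ p.length := by
      have : p ≠ [] := by simpa using hhead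
      exact List.length_pos_of_ne_nil this
    unfold solve solve_alt
    dsimp only
    rw [PySem.List.pyGetD_zero_cons,
      PySem.List.foldl_pyRange_pyGetD' (p :: rest) [] (solveRowA p.length) p (by norm_num),
      rows_eq p.length hn _ p rfl,
      show Int.toNat 1 = 1 from rfl, PySem.List.slice_from_one, List.drop_one]
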